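-- pv_equiv track=rewrite | github.com/hitochan777/unk-replacer | restorer.py | restore_bpe
-- ===== SOURCE A (Python) =====
-- from typing import List
--
-- def restore_bpe(seq: List[str]) -> List[str]:
--     result = []
--     buf = []
--     for word in seq:
--         if word.endswith("@@"):
--             buf.append(word[:-2])
--         else:
--             if word.endswith("</w>") and len(word[:-4]) != 0:
--                 buf.append(word[:-4])
--             else:  # word not in BPE voc
--                 buf.append(word)
--
--             result.append(''.join(buf))
--             buf = []
--
--     if len(buf) > 0:
--         result.append(' '.join(buf))
--
--     return result
-- ===== SOURCE B (Python) =====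
-- from typing import List
--
-- def restore_bpe(seq: List[str]) -> List[str]:
--     def _strip(w):
--         if w.endswith("@@"):
--             return w[:-2]
--         if w.endswith("</w>") and len(w[:-4]) != 0:
--             return w[:-4]
--         return w
--
--     out = []
--     i, n = 0, len(seq)
--     while i < n:
--         j = i
--         while j < n and seq[j].endswith("@@"):
--             j += 1
--         if j < n:
--             out.append(''.join(_strip(w) for w in seq[i:j + 1]))
--             i = j + 1
--         else:
--             out.append(' '.join(_strip(w) for w in seq[i:j]))
--             i = j
--     return out
-- ===== Notes on version B (the rewrite author's own statement) =====
-- stated objective: alternative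
-- what changed: Replaces A's single fold carrying a mutable buffer plus a post-loop flush by a run-based two-pointer scan: each maximal run of '@@' tokens (plus its closing token, if any) is located first and emitted as one joined word, with a uniform _strip helper instead of inline suffix branches.
import Mathlib
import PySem

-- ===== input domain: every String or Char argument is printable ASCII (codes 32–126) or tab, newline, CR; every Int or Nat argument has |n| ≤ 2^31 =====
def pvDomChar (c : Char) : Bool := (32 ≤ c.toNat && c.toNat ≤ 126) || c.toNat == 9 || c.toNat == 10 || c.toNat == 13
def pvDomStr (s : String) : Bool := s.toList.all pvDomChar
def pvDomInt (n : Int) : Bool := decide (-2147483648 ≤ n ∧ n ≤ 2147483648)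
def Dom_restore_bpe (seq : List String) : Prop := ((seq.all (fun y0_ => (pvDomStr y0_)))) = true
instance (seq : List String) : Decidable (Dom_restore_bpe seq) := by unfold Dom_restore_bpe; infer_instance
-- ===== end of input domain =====

-- B replaces A's fold-with-buffer by a run-based two-pointer scan with a uniform strip helper; alternative decomposition, same cost.

-- ===== PORT A =====
def restore_bpe (seq : List String) : List String :=
  let st := seq.foldl (fun (st : List String × List String) word =>
      if PySem.Str.endswith word "@@" then
        (st.1, st.2 ++ [PySem.Str.slice word none (some (-2))])
      else if PySem.Str.endswith word "</w>" && !(PySem.Str.len (PySem.Str.slice word none (some (-4))) == 0) then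
        (st.1 ++ [PySem.Str.join "" (st.2 ++ [PySem.Str.slice word none (some (-4))])], [])
      else
        (st.1 ++ [PySem.Str.join "" (st.2 ++ [word])], []))
    ([], [])
  if 0 < st.2.length then st.1 ++ [PySem.Str.join " " st.2] else st.1

-- ===== PORT B =====
-- B's `_strip` helper
def pvStrip (w : String) : String :=
  if PySem.Str.endswith w "@@" then PySem.Str.slice w none (some (-2))
  else if PySem.Str.endswith w "</w>" && !(PySem.Str.len (PySem.Str.slice w none (some (-4))) == 0) then
    PySem.Str.slice w none (some (-4))
  else w

-- the inner `while j < n and seq[j].endswith("@@")` run scan is takeWhile/dropWhile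
def pvIsAt (w : String) : Bool := PySem.Str.endswith w "@@"

def restore_bpe_alt (seq : List String) : List String :=
  match seq with
  | [] => []
  | w :: ws =>
    match hr : List.dropWhile pvIsAt (w :: ws) with
    | [] => [PySem.Str.join " " (((w :: ws).takeWhile pvIsAt).map pvStrip)]
    | x :: rest =>
      PySem.Str.join "" ((((w :: ws).takeWhile pvIsAt).map pvStrip) ++ [pvStrip x]) ::
      restore_bpe_alt rest
termination_by seq.length
decreasing_by
  have h := List.length_dropWhile_le (p := pvIsAt) (l := w :: ws)
  rw [hr] at h
  simp at h ⊢
  omega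

-- ===== PRECONDITION & SPEC =====
def Spec_restore_bpe (seq : List String) (out : List String) : Prop := out = restore_bpe_alt seq
instance (seq : List String) (out : List String) : Decidable (Spec_restore_bpe seq out) := by unfold Spec_restore_bpe; infer_instance

-- ===== CLAIM (what is proved, stated in full; the proofs are below) =====
def Claim_equal_restore_bpe : Prop := ∀ (seq : List String), Dom_restore_bpe seq → Spec_restore_bpe seq (restore_bpe seq)

-- ===== LEMMAS AND PROOFS =====

-- A's loop body, written as structural recursion on the remaining input (buf generalized)
def aGo (buf : List String) : List String → List String
  | [] => if 0 < buf.length then [PySem.Str.join " " buf] else []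
  | w :: ws =>
    if PySem.Str.endswith w "@@" then
      aGo (buf ++ [PySem.Str.slice w none (some (-2))]) ws
    else if PySem.Str.endswith w "</w>" && !(PySem.Str.len (PySem.Str.slice w none (some (-4))) == 0) then
      PySem.Str.join "" (buf ++ [PySem.Str.slice w none (some (-4))]) :: aGo [] ws
    else
      PySem.Str.join "" (buf ++ [w]) :: aGo [] ws

-- B's recursion with an explicit pending prefix, for the bridge
def altP (buf seq : List String) : List String :=
  match List.dropWhile pvIsAt seq with
  | [] =>
    if 0 < (buf ++ (seq.takeWhile pvIsAt).map pvStrip).length then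
      [PySem.Str.join " " (buf ++ (seq.takeWhile pvIsAt).map pvStrip)]
    else []
  | x :: rest =>
    PySem.Str.join "" (buf ++ (seq.takeWhile pvIsAt).map pvStrip ++ [pvStrip x]) ::
    restore_bpe_alt rest

theorem alt_eq_altP (seq : List String) : restore_bpe_alt seq = altP [] seq := by
  cases seq with
  | nil => simp [restore_bpe_alt, altP]
  | cons w ws =>
    rw [restore_bpe_alt, altP]
    rcases hd : List.dropWhile pvIsAt (w :: ws) with _ | ⟨x, rest⟩
    · have hw : pvIsAt w = true := by
        by_cases hc : pvIsAt w = true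
        · exact hc
        · rw [List.dropWhile_cons, if_neg hc] at hd
          exact absurd hd (List.cons_ne_nil _ _)
      simp [hw]
    · simp

theorem aGo_eq_altP (seq : List String) : ∀ buf, aGo buf seq = altP buf seq := by
  induction seq with
  | nil => intro buf; simp [aGo, altP]
  | cons w ws ih =>
    intro buf
    by_cases hA : PySem.Str.endswith w "@@" = true
    · have hAt : pvIsAt w = true := hA
      rw [aGo, if_pos hA, ih]
      have hstrip : pvStrip w = PySem.Str.slice w none (some (-2)) := by
        rw [pvStrip, if_pos hA]
      rw [altP, altP]
      rw [show List.dropWhile pvIsAt (w :: ws) = List.dropWhile pvIsAt ws by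
        rw [List.dropWhile_cons, if_pos hAt]]
      rw [show (w :: ws).takeWhile pvIsAt = w :: ws.takeWhile pvIsAt by
        rw [List.takeWhile_cons, if_pos hAt]]
      rcases hd : List.dropWhile pvIsAt ws with _ | ⟨x, rest⟩
      · simp [hstrip, List.append_assoc]
      · simp [hstrip, List.append_assoc]
    · have hAt : pvIsAt w = false := by
        rw [pvIsAt]; exact Bool.not_eq_true _ ▸ (by simpa using hA)
      have hb : aGo [] ws = restore_bpe_alt ws := by rw [ih, ← alt_eq_altP]
      rw [aGo, if_neg hA]
      rw [altP]
      rw [show List.dropWhile pvIsAt (w :: ws) = w :: ws by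
        rw [List.dropWhile_cons, if_neg (by simp [hAt])]]
      rw [show (w :: ws).takeWhile pvIsAt = [] by
        rw [List.takeWhile_cons, if_neg (by simp [hAt])]]
      by_cases h2 : (PySem.Str.endswith w "</w>" && !(PySem.Str.len (PySem.Str.slice w none (some (-4))) == 0)) = true
      · have hstrip : pvStrip w = PySem.Str.slice w none (some (-4)) := by
          rw [pvStrip, if_neg hA, if_pos h2]
        rw [if_pos h2, hb]
        simp [hstrip]
      · have hstrip : pvStrip w = w := by
          rw [pvStrip, if_neg hA, if_neg h2]
        rw [if_neg h2, hb]
        simp [hstrip]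

theorem foldA_eq_aGo (seq : List String) : ∀ res buf,
    (let st := seq.foldl (fun (st : List String × List String) word =>
      if PySem.Str.endswith word "@@" then
        (st.1, st.2 ++ [PySem.Str.slice word none (some (-2))])
      else if PySem.Str.endswith word "</w>" && !(PySem.Str.len (PySem.Str.slice word none (some (-4))) == 0) then
        (st.1 ++ [PySem.Str.join "" (st.2 ++ [PySem.Str.slice word none (some (-4))])], [])
      else
        (st.1 ++ [PySem.Str.join "" (st.2 ++ [word])], []))
      (res, buf)
     if 0 < st.2.length then st.1 ++ [PySem.Str.join " " st.2] else st.1)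
    = res ++ aGo buf seq := by
  induction seq with
  | nil =>
    intro res buf
    by_cases h : 0 < buf.length <;> simp [aGo, h]
  | cons w ws ih =>
    intro res buf
    simp only [List.foldl_cons]
    by_cases hA : PySem.Str.endswith w "@@" = true
    · rw [if_pos hA, aGo, if_pos hA]
      exact ih res (buf ++ [PySem.Str.slice w none (some (-2))])
    · rw [if_neg hA, aGo, if_neg hA]
      by_cases h2 : (PySem.Str.endswith w "</w>" && !(PySem.Str.len (PySem.Str.slice w none (some (-4))) == 0)) = true
      · rw [if_pos h2, if_pos h2, ih, List.append_assoc]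
        rfl
      · rw [if_neg h2, if_neg h2, ih, List.append_assoc]
        rfl

-- ===== VERDICT (by name: the statement is the Claim_ definition above) =====
theorem restore_bpe_spec : Claim_equal_restore_bpe := by
  intro seq _
  show restore_bpe seq = restore_bpe_alt seq
  rw [restore_bpe, foldA_eq_aGo seq [] [], aGo_eq_altP, ← alt_eq_altP]
  rfl
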